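-- pv_equiv track=rewrite | github.com/nirvanesque/livnium.core | arch-archive/experiments/ramsey/ramsey_tension.py | count_monochromatic_k3
-- ===== SOURCE A (Python) =====
-- from itertools import combinations
-- from typing import Dict, Tuple, List
--
-- Edge = Tuple[int, int]
--
-- Coloring = Dict[Edge, int]
--
-- def _norm_edge(u: int, v: int) -> Edge:
--     """Always store edges sorted so (i,j) == (j,i)."""
--     return (u, v) if u < v else (v, u)
--
-- def get_all_k3_subsets(vertices: List[int]) -> List[Tuple[int, int, int]]:
--     """All triangles on vertex set."""
--     return list(combinations(vertices, 3))
--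
-- def get_k3_edges(triangle: Tuple[int, int, int]) -> List[Edge]:
--     """Edges of a triangle (a,b,c)."""
--     a, b, c = triangle
--     return [
--         _norm_edge(a, b),
--         _norm_edge(a, c),
--         _norm_edge(b, c),
--     ]
--
-- def count_monochromatic_k3(coloring: Coloring, vertices: List[int]) -> int:
--     """
--     Count monochromatic triangles K3.
--
--     A K3 = (a,b,c) is a violation if all 3 edges have the same color.
--     """
--     triangles = get_all_k3_subsets(vertices)
--     violations = 0
--
--     for tri in triangles:
--         e1, e2, e3 = get_k3_edges(tri)
--         # If any edge missing from coloring, skip this triangle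
--         if e1 not in coloring or e2 not in coloring or e3 not in coloring:
--             continue
--         c1 = coloring[e1]
--         c2 = coloring[e2]
--         c3 = coloring[e3]
--         if c1 == c2 == c3:
--             violations += 1
--
--     return violations
-- ===== SOURCE B (Python) =====
-- def count_monochromatic_k3(coloring, vertices):
--     """
--     Count monochromatic triangles K3 without enumerating vertex triples.
--
--     Two staged passes: (1) index, for every (vertex position, color), the set
--     of earlier positions joined to it by an edge of that color; (2) walk the
--     colored position pairs once and close each pair (i, j) at its middle edge
--     by intersecting the earlier-neighbour sets of i and j.
--     """
--     E = list(enumerate(vertices))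
--     nbr = {}                      # (position, color) -> earlier same-colored neighbour positions
--     for k, vk in E:
--         for a, va in E[:k]:
--             e = (va, vk) if va < vk else (vk, va)
--             c = coloring.get(e)
--             if c is not None:
--                 nbr.setdefault((k, c), set()).add(a)
--     total = 0
--     for j, vj in E:
--         for i, vi in E[:j]:
--             e = (vi, vj) if vi < vj else (vj, vi)
--             c = coloring.get(e)
--             if c is None:
--                 continue
--             s = nbr.get((j, c), set())
--             t = nbr.get((i, c), set())
--             total += sum(1 for x in t if x in s)
--     return total
-- ===== Notes on version B (the rewrite author's own statement) =====
-- stated objective: faster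
-- what changed: A enumerates all C(n,3) vertex triples and tests the three edges of each; B never looks at triples: a first pass groups, per (vertex position, edge color), the earlier same-colored neighbour positions into a dict of sets, and a second pass walks only the colored position pairs, closing each pair at its middle edge by intersecting the two endpoints' neighbour sets.
import Mathlib
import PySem

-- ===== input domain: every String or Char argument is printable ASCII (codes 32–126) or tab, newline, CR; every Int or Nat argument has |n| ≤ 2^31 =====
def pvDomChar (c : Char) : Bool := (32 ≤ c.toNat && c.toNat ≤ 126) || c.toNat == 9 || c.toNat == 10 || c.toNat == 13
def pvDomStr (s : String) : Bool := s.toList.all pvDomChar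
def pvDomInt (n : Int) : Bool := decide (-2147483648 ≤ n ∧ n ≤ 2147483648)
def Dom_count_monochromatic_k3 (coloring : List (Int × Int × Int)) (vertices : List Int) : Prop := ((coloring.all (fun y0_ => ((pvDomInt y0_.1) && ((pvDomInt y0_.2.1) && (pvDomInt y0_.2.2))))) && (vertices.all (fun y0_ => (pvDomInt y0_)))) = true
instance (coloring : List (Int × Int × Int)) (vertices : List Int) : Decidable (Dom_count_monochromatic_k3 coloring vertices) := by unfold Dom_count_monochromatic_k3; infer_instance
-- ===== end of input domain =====

-- B replaces A's scan of all vertex triples by two staged passes: it indexes, per (vertex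
-- position, edge color), the earlier same-colored neighbour positions, then closes each colored
-- position pair at its middle edge by intersecting two neighbour sets (objective: faster).


-- shared model of the Python dict lookup on the input coloring: first-match association lookup
-- ('e in coloring' / 'coloring[e]' / 'coloring.get(e)')
def pyDictGet? (coloring : List (Int × Int × Int)) (e : Int × Int) : Option Int :=
  match coloring with
  | [] => none
  | (u, v, col) :: rest => if (u, v) = e then some col else pyDictGet? rest e

-- ===== PORT A =====
-- _norm_edge
def norm_edge (u v : Int) : Int × Int := if u < v then (u, v) else (v, u)

-- itertools.combinations(xs, 2), ported by hand (lexicographic-by-index order)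
def pyCombinations2 : List Int → List (Int × Int)
  | [] => []
  | x :: xs => xs.map (fun y => (x, y)) ++ pyCombinations2 xs

-- get_all_k3_subsets = list(combinations(vertices, 3))
def get_all_k3_subsets : List Int → List (Int × Int × Int)
  | [] => []
  | x :: xs => (pyCombinations2 xs).map (fun p => (x, p.1, p.2)) ++ get_all_k3_subsets xs

def get_k3_edges (t : Int × Int × Int) : List (Int × Int) :=
  [norm_edge t.1 t.2.1, norm_edge t.1 t.2.2, norm_edge t.2.1 t.2.2]

def count_monochromatic_k3 (coloring : List (Int × Int × Int)) (vertices : List Int) : Int :=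
  (get_all_k3_subsets vertices).foldl (fun violations tri =>
    match get_k3_edges tri with
    | [e1, e2, e3] =>
      -- 'if e1 not in coloring or …: continue' then 'coloring[e1]' … : a triple Option match
      match pyDictGet? coloring e1, pyDictGet? coloring e2, pyDictGet? coloring e3 with
      | some c1, some c2, some c3 => if c1 = c2 ∧ c2 = c3 then violations + 1 else violations
      | _, _, _ => violations
    | _ => violations) 0

-- ===== PORT B =====
-- pass 1 inner loop of Source B: 'for a, va in E[:k]: … nbr.setdefault((k, c), set()).add(a)'
def rowFold (coloring : List (Int × Int × Int)) (k vk : Int) (P : List (Int × Int))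
    (d : PySem.Dict (Int × Int) (List Int)) : PySem.Dict (Int × Int) (List Int) :=
  P.foldl (fun d av =>
    match pyDictGet? coloring (if av.2 < vk then (av.2, vk) else (vk, av.2)) with
    | none => d
    | some c => d.modify (k, c) [] (fun s => PySem.Set.add s av.1)) d

-- pass 1 of Source B: build nbr over 'for k, vk in E'
def buildNbr (coloring : List (Int × Int × Int)) (E : List (Int × Int)) :
    PySem.Dict (Int × Int) (List Int) :=
  E.foldl (fun d kv => rowFold coloring kv.1 kv.2 (PySem.List.slice E none (some kv.1)) d)
    PySem.Dict.empty

-- pass 2 of Source B: 'for j, vj in E: for i, vi in E[:j]: … total += sum(1 for x in t if x in s)'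
def pass2 (coloring : List (Int × Int × Int)) (E : List (Int × Int))
    (nbr : PySem.Dict (Int × Int) (List Int)) : Int :=
  E.foldl (fun total jv =>
    (PySem.List.slice E none (some jv.1)).foldl (fun total iv =>
      match pyDictGet? coloring (if iv.2 < jv.2 then (iv.2, jv.2) else (jv.2, iv.2)) with
      | none => total
      | some c =>
          total + (((nbr.getD (iv.1, c) []).filter
            (fun x => PySem.Set.contains (nbr.getD (jv.1, c) []) x)).length : Int)) total) 0

def count_monochromatic_k3_alt (coloring : List (Int × Int × Int)) (vertices : List Int) : Int :=
  pass2 coloring (PySem.List.enumerate vertices) (buildNbr coloring (PySem.List.enumerate vertices))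

-- ===== PRECONDITION & SPEC =====
def Spec_count_monochromatic_k3 (coloring : List (Int × Int × Int)) (vertices : List Int) (out : Int) : Prop := out = count_monochromatic_k3_alt coloring vertices
instance (coloring : List (Int × Int × Int)) (vertices : List Int) (out : Int) : Decidable (Spec_count_monochromatic_k3 coloring vertices out) := by unfold Spec_count_monochromatic_k3; infer_instance

-- ===== CLAIM (what is proved, stated in full; the proofs are below) =====
def Claim_equal_count_monochromatic_k3 : Prop := ∀ (coloring : List (Int × Int × Int)) (vertices : List Int), Dom_count_monochromatic_k3 coloring vertices → Spec_count_monochromatic_k3 coloring vertices (count_monochromatic_k3 coloring vertices)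

-- ===== LEMMAS AND PROOFS =====

def colE (coloring : List (Int × Int × Int)) (u v : Int) : Option Int :=
  pyDictGet? coloring (if u < v then (u, v) else (v, u))

def triContrib (coloring : List (Int × Int × Int)) (t : Int × Int × Int) : Int :=
  match pyDictGet? coloring (norm_edge t.1 t.2.1), pyDictGet? coloring (norm_edge t.1 t.2.2),
        pyDictGet? coloring (norm_edge t.2.1 t.2.2) with
  | some c1, some c2, some c3 => if c1 = c2 ∧ c2 = c3 then 1 else 0
  | _, _, _ => 0

theorem a_foldl_eq_sum (coloring : List (Int × Int × Int)) (l : List (Int × Int × Int)) (acc : Int) :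
    l.foldl (fun violations tri =>
      match get_k3_edges tri with
      | [e1, e2, e3] =>
        match pyDictGet? coloring e1, pyDictGet? coloring e2, pyDictGet? coloring e3 with
        | some c1, some c2, some c3 => if c1 = c2 ∧ c2 = c3 then violations + 1 else violations
        | _, _, _ => violations
      | _ => violations) acc
    = acc + (l.map (triContrib coloring)).sum := by
  induction l generalizing acc with
  | nil => simp
  | cons t rest ih =>
    rw [List.foldl_cons, ih]
    obtain ⟨a, b, c⟩ := t
    simp only [List.map_cons, List.sum_cons, get_k3_edges, triContrib]
    rcases h1 : pyDictGet? coloring (norm_edge a b) with _ | c1 <;>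
      rcases h2 : pyDictGet? coloring (norm_edge a c) with _ | c2 <;>
        rcases h3 : pyDictGet? coloring (norm_edge b c) with _ | c3 <;>
          simp only [] <;> (try split_ifs) <;> ring

theorem sum2_append (f : Int × Int → Int) (xs : List Int) (c : Int) :
    ((pyCombinations2 (xs ++ [c])).map f).sum
      = ((pyCombinations2 xs).map f).sum + ((xs.map (fun a => (a, c))).map f).sum := by
  induction xs with
  | nil => simp [pyCombinations2]
  | cons x xs ih => simp [pyCombinations2, ih]; omega

theorem sum3_append (g : Int × Int × Int → Int) (xs : List Int) (c : Int) :
    ((get_all_k3_subsets (xs ++ [c])).map g).sum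
      = ((get_all_k3_subsets xs).map g).sum
        + ((pyCombinations2 xs).map (fun p => g (p.1, p.2, c))).sum := by
  induction xs with
  | nil => simp [get_all_k3_subsets, pyCombinations2]
  | cons x xs ih =>
    simp only [List.cons_append, get_all_k3_subsets, pyCombinations2, List.map_append,
      List.sum_append, ih, List.map_map, Function.comp_def]
    have h2 := sum2_append (fun p => g (x, p.1, p.2)) xs c
    simp only [List.map_map, Function.comp_def] at h2
    omega

def specN (coloring : List (Int × Int × Int)) (vs : List Int) (k c : Int) : List Int :=
  if 0 ≤ k ∧ k < (vs.length : Int) then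
    (((PySem.List.enumerate vs).take k.toNat).filter
      (fun av => colE coloring av.2 (vs.getD k.toNat 0) == some c)).map Prod.fst
  else []

def innerTerm (coloring : List (Int × Int × Int)) (nbr : PySem.Dict (Int × Int) (List Int))
    (jv iv : Int × Int) : Int :=
  match pyDictGet? coloring (if iv.2 < jv.2 then (iv.2, jv.2) else (jv.2, iv.2)) with
  | none => 0
  | some c =>
      (((nbr.getD (iv.1, c) []).filter
        (fun x => PySem.Set.contains (nbr.getD (jv.1, c) []) x)).length : Int)

theorem enum_snoc (vs : List Int) (w : Int) (s : Int) :
    PySem.List.enumerate (vs ++ [w]) s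
      = PySem.List.enumerate vs s ++ [((s + vs.length : Int), w)] := by
  induction vs generalizing s with
  | nil => simp [PySem.List.enumerate_cons, PySem.List.enumerate]
  | cons x xs ih =>
    simp [PySem.List.enumerate_cons, ih]
    ring_nf

theorem enum_mem (vs : List Int) (s : Int) (p : Int × Int) (hp : p ∈ PySem.List.enumerate vs s) :
    ∃ i : Nat, ∃ h : i < vs.length, p = ((s + i : Int), vs[i]) := by
  induction vs generalizing s with
  | nil => simp [PySem.List.enumerate] at hp
  | cons x xs ih =>
    rw [PySem.List.enumerate_cons] at hp
    rcases List.mem_cons.mp hp with h | h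
    · exact ⟨0, by simp, by simpa using h⟩
    · obtain ⟨i, hi, rfl⟩ := ih (s+1) h
      exact ⟨i+1, by simpa using hi, by simp; ring⟩

theorem enum_fst_nodup (vs : List Int) (s : Int) :
    ((PySem.List.enumerate vs s).map Prod.fst).Nodup := by
  rw [show (Prod.fst : Int × Int → Int) = fun x => x.1 from rfl, PySem.List.map_fst_enumerate]
  exact PySem.List.nodup_pyRange_one _ _

theorem enum_fst_inj (vs : List Int) (s : Int) (p q : Int × Int)
    (hp : p ∈ PySem.List.enumerate vs s) (hq : q ∈ PySem.List.enumerate vs s)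
    (h : p.1 = q.1) : p = q := by
  obtain ⟨i, hi, rfl⟩ := enum_mem vs s p hp
  obtain ⟨j, hj, rfl⟩ := enum_mem vs s q hq
  simp at h
  have : i = j := by omega
  subst this
  rfl

theorem slice_enum_snoc (vs : List Int) (w : Int) (kv : Int × Int)
    (hkv : kv ∈ PySem.List.enumerate vs) :
    PySem.List.slice (PySem.List.enumerate vs ++ [((vs.length : Int), w)]) none (some kv.1)
      = PySem.List.slice (PySem.List.enumerate vs) none (some kv.1) := by
  obtain ⟨i, hi, rfl⟩ := enum_mem vs 0 kv hkv
  simp only [zero_add]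
  rw [show ((i : Nat) : Int) = ((i : Nat) : Int) from rfl]
  rw [PySem.List.slice_to_natCast, PySem.List.slice_to_natCast]
  exact List.take_append_of_le_length (by rw [PySem.List.length_enumerate]; omega)

theorem rowFold_getD (coloring : List (Int × Int × Int)) (k vk : Int)
    (P : List (Int × Int)) (d : PySem.Dict (Int × Int) (List Int)) (k' c' : Int)
    (h1 : ∀ c : Int, ∀ x ∈ d.getD (k, c) [], x ∉ P.map Prod.fst)
    (h2 : (P.map Prod.fst).Nodup) :
    (rowFold coloring k vk P d).getD (k', c') [] =
      if k' = k then
        d.getD (k, c') [] ++ ((P.filter (fun av => colE coloring av.2 vk == some c')).map Prod.fst)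
      else d.getD (k', c') [] := by
  induction P generalizing d with
  | nil => simp [rowFold]; intro h; rw [h]
  | cons av rest ih =>
    simp only [List.map_cons, List.nodup_cons] at h2
    rw [rowFold, List.foldl_cons]
    cases hcol : pyDictGet? coloring (if av.2 < vk then (av.2, vk) else (vk, av.2)) with
    | none =>
      rw [show (List.foldl (fun d av =>
          match pyDictGet? coloring (if av.2 < vk then (av.2, vk) else (vk, av.2)) with
          | none => d
          | some c => d.modify (k, c) [] (fun s => PySem.Set.add s av.1)) d rest)
        = rowFold coloring k vk rest d from rfl]
      rw [ih d (fun c x hx => by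
          have := h1 c x hx; simp only [List.map_cons, List.mem_cons] at this; tauto) h2.2]
      have hf : (colE coloring av.2 vk == some c') = false := by
        simp [colE, hcol]
      simp [List.filter_cons, hf]
    | some c =>
      set d' := d.modify (k, c) [] (fun s => PySem.Set.add s av.1) with hd'
      rw [show (List.foldl (fun d av =>
          match pyDictGet? coloring (if av.2 < vk then (av.2, vk) else (vk, av.2)) with
          | none => d
          | some c => d.modify (k, c) [] (fun s => PySem.Set.add s av.1)) d' rest)
        = rowFold coloring k vk rest d' from rfl]
      have hkey : ∀ c0 : Int, ((k, c0) = (k, c)) ↔ c0 = c := by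
        intro c0; constructor
        · intro h; exact (Prod.mk.injEq _ _ _ _).mp h |>.2
        · intro h; rw [h]
      have hget : ∀ c0 : Int, d'.getD (k, c0) [] =
          if c0 = c then PySem.Set.add (d.getD (k, c) []) av.1 else d.getD (k, c0) [] := by
        intro c0
        rw [hd', PySem.Dict.getD_modify]
        simp [hkey c0]
      have havmem : av.1 ∉ d.getD (k, c) [] := by
        intro hmem
        exact h1 c av.1 hmem (by simp)
      have hadd : PySem.Set.add (d.getD (k, c) []) av.1 = d.getD (k, c) [] ++ [av.1] := by
        simp [PySem.Set.add, havmem]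
      have h1' : ∀ c0 : Int, ∀ x ∈ d'.getD (k, c0) [], x ∉ rest.map Prod.fst := by
        intro c0 x hx
        rw [hget c0] at hx
        by_cases hc0 : c0 = c
        · rw [if_pos hc0] at hx
          rcases (PySem.Set.mem_add _ _ _).mp hx with hx' | hx'
          · have := h1 c x hx'; simp only [List.map_cons, List.mem_cons] at this; tauto
          · rw [hx']; exact h2.1
        · rw [if_neg hc0] at hx
          have := h1 c0 x hx; simp only [List.map_cons, List.mem_cons] at this; tauto
      rw [ih d' h1' h2.2]
      by_cases hk : k' = k
      · rw [if_pos hk, if_pos hk]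
        by_cases hc : c' = c
        · subst hc
          rw [hget c', if_pos rfl, hadd]
          have ht : (colE coloring av.2 vk == some c') = true := by
            simp [colE, hcol]
          simp [List.filter_cons, ht]
        · rw [hget c', if_neg hc]
          have hf : (colE coloring av.2 vk == some c') = false := by
            simp [colE, hcol]; exact fun h => hc h.symm
          simp [List.filter_cons, hf]
      · rw [if_neg hk, if_neg hk]
        rw [hd', PySem.Dict.getD_modify]
        rw [if_neg (by simp [Prod.ext_iff]; intro h; exact absurd h hk)]

theorem build_snoc (coloring : List (Int × Int × Int)) (vs : List Int) (w : Int) :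
    buildNbr coloring (PySem.List.enumerate vs ++ [((vs.length : Int), w)])
      = rowFold coloring (vs.length : Int) w (PySem.List.enumerate vs)
          (buildNbr coloring (PySem.List.enumerate vs)) := by
  rw [buildNbr, List.foldl_append, List.foldl_cons, List.foldl_nil]
  have h1 : PySem.List.slice (PySem.List.enumerate vs ++ [((vs.length : Int), w)]) none
      (some (vs.length : Int)) = PySem.List.enumerate vs := by
    rw [PySem.List.slice_to_natCast]
    rw [show vs.length = (PySem.List.enumerate vs (0:Int)).length from
      (PySem.List.length_enumerate vs 0).symm]
    exact List.take_left
  rw [h1]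
  congr 1
  rw [buildNbr]
  exact PySem.List.foldl_congr_mem _ _ _ _ (fun acc kv hkv => by
    rw [slice_enum_snoc vs w kv hkv])

theorem build_getD (coloring : List (Int × Int × Int)) (vs : List Int) (k c : Int) :
    (buildNbr coloring (PySem.List.enumerate vs)).getD (k, c) [] = specN coloring vs k c := by
  induction vs using List.reverseRecOn generalizing k c with
  | nil =>
    rw [show PySem.List.enumerate ([] : List Int) = [] from rfl]
    rw [show buildNbr coloring [] = PySem.Dict.empty from rfl]
    rw [PySem.Dict.getD_empty, specN]
    rw [if_neg (by simp only [List.length_nil, Nat.cast_zero]; omega)]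
  | append_singleton vs w ih =>
    have hsn : PySem.List.enumerate (vs ++ [w]) = PySem.List.enumerate vs ++ [((vs.length : Int), w)] := by
      rw [enum_snoc]; norm_num
    rw [hsn, build_snoc]
    rw [rowFold_getD coloring (vs.length : Int) w _ _ k c
      (fun c0 x hx => by rw [ih] at hx; rw [specN, if_neg (by simp)] at hx; simp at hx)
      (enum_fst_nodup vs 0)]
    by_cases hk : k = (vs.length : Int)
    · rw [if_pos hk, ih, specN, if_neg (by simp), List.nil_append]
      rw [specN, if_pos (by constructor <;> [omega; (simp; omega)])]
      have h1 : k.toNat = vs.length := by omega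
      have h2 : (PySem.List.enumerate (vs ++ [w])).take k.toNat = PySem.List.enumerate vs := by
        rw [hsn, h1]
        rw [show vs.length = (PySem.List.enumerate vs (0:Int)).length from
          (PySem.List.length_enumerate vs 0).symm]
        exact List.take_left
      have h3 : (vs ++ [w]).getD k.toNat 0 = w := by
        rw [h1]
        simp
      rw [h2, h3]
    · rw [if_neg hk, ih, specN, specN]
      by_cases hin : 0 ≤ k ∧ k < (vs.length : Int)
      · rw [if_pos hin, if_pos (by simp; omega)]
        have h2 : (PySem.List.enumerate (vs ++ [w])).take k.toNat = (PySem.List.enumerate vs).take k.toNat := by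
          rw [hsn]
          exact List.take_append_of_le_length (by rw [PySem.List.length_enumerate]; omega)
        have h3 : (vs ++ [w]).getD k.toNat 0 = vs.getD k.toNat 0 := by
          have hlt : k.toNat < vs.length := by omega
          simp [List.getD, List.getElem?_append_left, hlt]
        rw [h2, h3]
      · rw [if_neg hin, if_neg (by
          simp only [List.length_append, List.length_cons, List.length_nil, Nat.cast_add,
            Nat.cast_one]
          omega)]

theorem spec_top_nil (coloring : List (Int × Int × Int)) (vs : List Int) (c : Int) :
    specN coloring vs (vs.length : Int) c = [] := by
  rw [specN, if_neg (by omega)]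

theorem D_getD_top (coloring : List (Int × Int × Int)) (vs : List Int) (c : Int) :
    (buildNbr coloring (PySem.List.enumerate vs)).getD ((vs.length : Int), c) [] = [] := by
  rw [build_getD, spec_top_nil]

theorem foldl_skip_add {α : Type} (f : α → Option Int) (F : α → Int → Int) (l : List α) (t : Int) :
    l.foldl (fun t x => match f x with | none => t | some c => t + F x c) t
      = t + (l.map (fun x => match f x with | none => 0 | some c => F x c)).sum := by
  induction l generalizing t with
  | nil => simp
  | cons x rest ih =>
    simp only [List.foldl_cons, List.map_cons, List.sum_cons, ih]
    cases f x <;> simp <;> ring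

theorem pass2_eq_sum (coloring : List (Int × Int × Int)) (E : List (Int × Int))
    (nbr : PySem.Dict (Int × Int) (List Int)) :
    pass2 coloring E nbr
      = (E.map (fun jv =>
          ((PySem.List.slice E none (some jv.1)).map (innerTerm coloring nbr jv)).sum)).sum := by
  rw [pass2]
  rw [PySem.List.foldl_congr_mem E _ (fun total jv =>
      total + ((PySem.List.slice E none (some jv.1)).map (innerTerm coloring nbr jv)).sum) 0
    (fun acc jv _ => foldl_skip_add
      (fun (iv : Int × Int) => pyDictGet? coloring
        (if iv.2 < jv.2 then (iv.2, jv.2) else (jv.2, iv.2)))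
      (fun (iv : Int × Int) (c : Int) => (((nbr.getD (iv.1, c) []).filter
        (fun x => PySem.Set.contains (nbr.getD (jv.1, c) []) x)).length : Int)) _ acc)]
  rw [PySem.List.foldl_add]
  ring

theorem pairs_by_second (g : Int → Int → Int) (vs : List Int) :
    ((pyCombinations2 vs).map (fun p => g p.1 p.2)).sum
      = ((PySem.List.enumerate vs).map (fun jv =>
          (((PySem.List.enumerate vs).take jv.1.toNat).map (fun av => g av.2 jv.2)).sum)).sum := by
  induction vs using List.reverseRecOn with
  | nil => rfl
  | append_singleton vs w ih =>
    have hsn : PySem.List.enumerate (vs ++ [w])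
        = PySem.List.enumerate vs ++ [((vs.length : Int), w)] := by
      rw [enum_snoc]; norm_num
    rw [sum2_append, ih, hsn, List.map_append, List.sum_append]
    congr 1
    · apply congrArg
      apply List.map_congr_left
      intro jv hjv
      obtain ⟨i, hi, rfl⟩ := enum_mem vs 0 jv hjv
      rw [List.take_append_of_le_length
        (by rw [PySem.List.length_enumerate]; simp; omega)]
    · have htake : (PySem.List.enumerate vs ++ [((vs.length : Int), w)]).take
          (((vs.length : Int), w).1.toNat) = PySem.List.enumerate vs := by
        simp only [Int.toNat_natCast]
        rw [show vs.length = (PySem.List.enumerate vs (0:Int)).length from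
          (PySem.List.length_enumerate vs 0).symm]
        exact List.take_left
      simp only [List.map_cons, List.map_nil, List.sum_cons, List.sum_nil, htake]
      rw [show ((PySem.List.enumerate vs).map (fun av => g av.2 (((vs.length : Int), w)).2))
            = ((PySem.List.enumerate vs).map Prod.snd).map (fun x => g x w) by
          rw [List.map_map]; rfl]
      rw [show ((PySem.List.enumerate vs).map Prod.snd) = vs from
        PySem.List.map_snd_enumerate vs 0]
      simp [List.map_map, Function.comp_def]

theorem newterm_pointwise (coloring : List (Int × Int × Int)) (vs : List Int) (w : Int)
    (iv : Int × Int) (hiv : iv ∈ PySem.List.enumerate vs) :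
    (match colE coloring iv.2 w with
     | none => (0 : Int)
     | some c =>
         (((specN coloring vs iv.1 c).filter
           (fun x => PySem.Set.contains
             (((PySem.List.enumerate vs).filter
               (fun av => colE coloring av.2 w == some c)).map Prod.fst) x)).length : Int))
    = (((PySem.List.enumerate vs).take iv.1.toNat).map
        (fun av => triContrib coloring (av.2, iv.2, w))).sum := by
  obtain ⟨i, hi, rfl⟩ := enum_mem vs 0 iv hiv
  simp only [zero_add, Int.toNat_natCast]
  cases hcol : colE coloring vs[i] w with
  | none =>
    have h3 : pyDictGet? coloring (norm_edge vs[i] w) = none := hcol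
    symm
    apply List.sum_eq_zero
    intro x hx
    obtain ⟨av, hav, rfl⟩ := List.mem_map.mp hx
    rcases h1 : pyDictGet? coloring (norm_edge av.2 vs[i]) with _ | c1 <;>
      rcases h2 : pyDictGet? coloring (norm_edge av.2 w) with _ | c2 <;>
        simp [triContrib, h1, h2, h3]
  | some c =>
    have h3 : pyDictGet? coloring (norm_edge vs[i] w) = some c := hcol
    dsimp only
    unfold specN
    rw [if_pos ⟨by omega, by simp; omega⟩]
    simp only [Int.toNat_natCast]
    rw [List.getD_eq_getElem vs 0 hi]
    rw [List.filter_map, List.length_map]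
    rw [List.filter_filter]
    have hmap : (((PySem.List.enumerate vs).take i).map
        (fun av => triContrib coloring (av.2, vs[i], w)))
        = (((PySem.List.enumerate vs).take i).map
          (fun av => if (colE coloring av.2 vs[i] == some c
              && colE coloring av.2 w == some c) = true then (1:Int) else 0)) := by
      apply List.map_congr_left
      intro av _
      have e1 : colE coloring av.2 vs[i] = pyDictGet? coloring (norm_edge av.2 vs[i]) := rfl
      have e2 : colE coloring av.2 w = pyDictGet? coloring (norm_edge av.2 w) := rfl
      rcases h1 : pyDictGet? coloring (norm_edge av.2 vs[i]) with _ | c1 <;>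
        rcases h2 : pyDictGet? coloring (norm_edge av.2 w) with _ | c2 <;>
          simp [triContrib, h1, h2, h3, e1, e2] <;> split_ifs <;> simp_all
    rw [hmap, PySem.List.sum_map_ite_one_zero, List.countP_eq_length_filter]
    congr 2
    apply List.filter_congr
    intro av hav
    have havE : av ∈ PySem.List.enumerate vs := List.mem_of_mem_take hav
    have hmem : av.1 ∈ ((PySem.List.enumerate vs).filter
        (fun av => colE coloring av.2 w == some c)).map Prod.fst
        ↔ (colE coloring av.2 w == some c) = true := by
      constructor
      · intro hm
        obtain ⟨bv, hbv, hfst⟩ := List.mem_map.mp hm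
        obtain ⟨hbvE, hbvq⟩ := List.mem_filter.mp hbv
        have : bv = av := enum_fst_inj vs 0 bv av hbvE havE hfst
        rwa [this] at hbvq
      · intro hq
        exact List.mem_map.mpr ⟨av, List.mem_filter.mpr ⟨havE, hq⟩, rfl⟩
    have hset : PySem.Set.contains (((PySem.List.enumerate vs).filter
        (fun av => colE coloring av.2 w == some c)).map Prod.fst) av.1
        = (colE coloring av.2 w == some c) := by
      cases hb : (colE coloring av.2 w == some c) with
      | false =>
        have hno : av.1 ∉ ((PySem.List.enumerate vs).filter
            (fun av => colE coloring av.2 w == some c)).map Prod.fst := by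
          intro hm
          rw [hmem] at hm
          rw [hb] at hm
          exact Bool.false_ne_true hm
        cases hc : PySem.Set.contains (((PySem.List.enumerate vs).filter
            (fun av => colE coloring av.2 w == some c)).map Prod.fst) av.1 with
        | false => rfl
        | true => exact absurd ((PySem.Set.contains_iff _ _).mp hc) hno
      | true =>
        exact (PySem.Set.contains_iff _ _).mpr (hmem.mpr hb)
    simp only [Function.comp_apply, hset, Bool.and_comm]

theorem newterm (coloring : List (Int × Int × Int)) (vs : List Int) (w : Int) :
    ((PySem.List.enumerate vs).map (fun iv =>
        match pyDictGet? coloring (if iv.2 < w then (iv.2, w) else (w, iv.2)) with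
        | none => (0 : Int)
        | some c =>
            (((specN coloring vs iv.1 c).filter
              (fun x => PySem.Set.contains
                (((PySem.List.enumerate vs).filter
                  (fun av => colE coloring av.2 w == some c)).map Prod.fst) x)).length : Int))).sum
      = ((pyCombinations2 vs).map (fun p => triContrib coloring (p.1, p.2, w))).sum := by
  rw [pairs_by_second (fun x y => triContrib coloring (x, y, w)) vs]
  apply congrArg
  apply List.map_congr_left
  intro iv hiv
  exact newterm_pointwise coloring vs w iv hiv

theorem alt_eq_sum (coloring : List (Int × Int × Int)) (vs : List Int) :
    count_monochromatic_k3_alt coloring vs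
      = ((get_all_k3_subsets vs).map (triContrib coloring)).sum := by
  induction vs using List.reverseRecOn with
  | nil => rfl
  | append_singleton vs w ih =>
    have hsn : PySem.List.enumerate (vs ++ [w])
        = PySem.List.enumerate vs ++ [((vs.length : Int), w)] := by
      rw [enum_snoc]; norm_num
    have hD1 : ∀ c0 : Int, ∀ x ∈ (buildNbr coloring (PySem.List.enumerate vs)).getD
        ((vs.length : Int), c0) [], x ∉ (PySem.List.enumerate vs).map Prod.fst := by
      intro c0 x hx
      rw [D_getD_top] at hx
      exact absurd hx (List.not_mem_nil)
    have hnd := enum_fst_nodup vs 0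
    have hfst_lt : ∀ iv ∈ PySem.List.enumerate vs, iv.1 ≠ (vs.length : Int) := by
      intro iv hivE
      obtain ⟨i, hilt, rfl⟩ := enum_mem vs 0 iv hivE
      simp
      omega
    have htakeE : (PySem.List.enumerate vs ++ [((vs.length : Int), w)]).take
        vs.length = PySem.List.enumerate vs := by
      rw [show vs.length = (PySem.List.enumerate vs (0:Int)).length from
        (PySem.List.length_enumerate vs 0).symm]
      exact List.take_left
    rw [count_monochromatic_k3_alt, hsn, build_snoc, pass2_eq_sum]
    rw [List.map_append, List.sum_append]
    have hpart1 : ((PySem.List.enumerate vs).map (fun jv =>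
        ((PySem.List.slice (PySem.List.enumerate vs ++ [((vs.length : Int), w)]) none
            (some jv.1)).map
          (innerTerm coloring (rowFold coloring (vs.length : Int) w (PySem.List.enumerate vs)
            (buildNbr coloring (PySem.List.enumerate vs))) jv)).sum)).sum
        = count_monochromatic_k3_alt coloring vs := by
      rw [count_monochromatic_k3_alt, pass2_eq_sum]
      apply congrArg
      apply List.map_congr_left
      intro jv hjv
      rw [slice_enum_snoc vs w jv hjv]
      apply congrArg
      apply List.map_congr_left
      intro iv hiv
      have hivE : iv ∈ PySem.List.enumerate vs :=
        PySem.List.mem_of_mem_slice _ none (some jv.1) hiv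
      rw [innerTerm, innerTerm]
      cases hcol : pyDictGet? coloring (if iv.2 < jv.2 then (iv.2, jv.2) else (jv.2, iv.2)) with
      | none => rfl
      | some c =>
        dsimp only
        rw [rowFold_getD coloring _ w _ _ iv.1 c hD1 hnd,
            rowFold_getD coloring _ w _ _ jv.1 c hD1 hnd]
        rw [if_neg (hfst_lt iv hivE), if_neg (hfst_lt jv hjv)]
    have hpart2 : (([((vs.length : Int), w)]).map (fun jv =>
        ((PySem.List.slice (PySem.List.enumerate vs ++ [((vs.length : Int), w)]) none
            (some jv.1)).map
          (innerTerm coloring (rowFold coloring (vs.length : Int) w (PySem.List.enumerate vs)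
            (buildNbr coloring (PySem.List.enumerate vs))) jv)).sum)).sum
        = ((pyCombinations2 vs).map (fun p => triContrib coloring (p.1, p.2, w))).sum := by
      simp only [List.map_cons, List.map_nil, List.sum_cons, List.sum_nil, add_zero]
      have hslice : PySem.List.slice (PySem.List.enumerate vs ++ [((vs.length : Int), w)]) none
          (some (((vs.length : Int), w)).1) = PySem.List.enumerate vs := by
        dsimp only
        rw [PySem.List.slice_to_natCast]
        exact htakeE
      rw [hslice]
      rw [← newterm coloring vs w]
      apply congrArg
      apply List.map_congr_left
      intro iv hivE
      rw [innerTerm]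
      cases hcol : pyDictGet? coloring (if iv.2 < w then (iv.2, w) else (w, iv.2)) with
      | none => rfl
      | some c =>
        dsimp only
        rw [rowFold_getD coloring _ w _ _ iv.1 c hD1 hnd,
            rowFold_getD coloring _ w _ _ (((vs.length : Int), w)).1 c hD1 hnd]
        rw [if_neg (hfst_lt iv hivE), if_pos rfl]
        rw [build_getD, spec_top_nil, List.nil_append, build_getD]
    rw [hpart1, hpart2, ih, sum3_append]

-- ===== VERDICT (by name: the statement is the Claim_ definition above) =====
theorem count_monochromatic_k3_spec : Claim_equal_count_monochromatic_k3 := by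
  intro coloring vertices _
  show _ = _
  rw [count_monochromatic_k3, a_foldl_eq_sum, alt_eq_sum]
  omega
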